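-- pv_equiv track=rewrite | github.com/dfleta/Python_ejercicios | Procedimental/Unidad_3_ Listas_y_ operaciones_sobre_listas/problem_set_3/matriz_antisimetrica_solucion.py | esAntisimetrica
-- ===== SOURCE A (Python) =====
-- def esMatrizCuadrada(matriz):
--
--     numeroFilas = len(matriz)
--
--     for fila in matriz:
--
--         if len(fila) != numeroFilas:
--             return False
--
--     return True
--
-- def esAntisimetrica(matriz):
--
--     # precondicion: manejo de errores.
--     # The public methods assume the data is unsafe,
--     # and they are responsible for checking the data (and sanitizing it).
--
--     # validate input: must be a square matrix
--     if not esMatrizCuadrada(matriz):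
--         return False
--
--     # iterate rows and columns, ensuring inner index resets per row
--     fila = 0
--     while fila < len(matriz):
--
--         columna = 0
--         while columna < len(matriz[fila]):
--
--             if matriz[fila][columna] != - matriz[columna][fila]:
--                 return False
--
--             columna += 1
--
--         fila += 1
--
--     return True
-- ===== SOURCE B (Python) =====
-- def esAntisimetrica(matriz):
--     n = len(matriz)
--     if any(len(fila) != n for fila in matriz):
--         return False
--     traspuesta_negada = [[-matriz[j][i] for j in range(n)] for i in range(n)]
--     return matriz == traspuesta_negada
-- ===== Notes on version B (the rewrite author's own statement) =====
-- stated objective: idiomatic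
-- what changed: Replaces the hand-rolled index-counter while-loops with early return by building the full negated transpose via comprehensions and comparing it to the matrix with a single list equality.
import Mathlib
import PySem

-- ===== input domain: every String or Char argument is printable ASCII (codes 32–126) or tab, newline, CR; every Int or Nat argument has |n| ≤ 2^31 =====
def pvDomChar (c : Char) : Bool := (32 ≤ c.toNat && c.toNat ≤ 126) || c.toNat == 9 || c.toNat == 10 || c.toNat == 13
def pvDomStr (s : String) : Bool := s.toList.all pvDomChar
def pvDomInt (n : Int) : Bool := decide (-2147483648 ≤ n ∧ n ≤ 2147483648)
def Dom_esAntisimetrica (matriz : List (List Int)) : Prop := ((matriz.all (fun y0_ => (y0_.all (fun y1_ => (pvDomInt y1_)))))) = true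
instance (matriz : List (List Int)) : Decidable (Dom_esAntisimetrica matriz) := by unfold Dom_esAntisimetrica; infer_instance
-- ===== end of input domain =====

-- B replaces A's index-counter while-loops (with early return) by building the negated
-- transpose as a nested list and comparing it to the matrix once (idiomatic decomposition).


-- ===== PORT A =====
-- for fila in matriz: if len(fila) != numeroFilas: return False; … return True
def esMatrizCuadradaLoop (numeroFilas : Nat) : List (List Int) → Bool
  | [] => true
  | fila :: rest => if fila.length ≠ numeroFilas then false else esMatrizCuadradaLoop numeroFilas rest

def esMatrizCuadrada (matriz : List (List Int)) : Bool :=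
  esMatrizCuadradaLoop matriz.length matriz

-- inner while: columna < len(matriz[fila]); both indices stay ≥ 0, so Nat counters are exact
def colLoop (matriz : List (List Int)) (fila columna : Nat) : Bool :=
  if _h : columna < (matriz.getD fila []).length then
    if (matriz.getD fila []).getD columna 0 ≠ - ((matriz.getD columna []).getD fila 0) then false
    else colLoop matriz fila (columna + 1)
  else true
termination_by (matriz.getD fila []).length - columna
decreasing_by simp only [List.getD] at _h ⊢; omega

-- outer while: fila < len(matriz)
def filaLoop (matriz : List (List Int)) (fila : Nat) : Bool :=
  if _h : fila < matriz.length then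
    if colLoop matriz fila 0 = false then false else filaLoop matriz (fila + 1)
  else true
termination_by matriz.length - fila

def esAntisimetrica (matriz : List (List Int)) : Bool :=
  if !esMatrizCuadrada matriz then false
  else filaLoop matriz 0

-- ===== PORT B =====
def esAntisimetrica_alt (matriz : List (List Int)) : Bool :=
  let n := matriz.length
  if matriz.any (fun fila => fila.length ≠ n) then false
  else
    let traspuestaNegada :=
      (List.range n).map (fun i => (List.range n).map (fun j => - ((matriz.getD j []).getD i 0)))
    matriz == traspuestaNegada

-- ===== PRECONDITION & SPEC =====
def Spec_esAntisimetrica (matriz : List (List Int)) (out : Bool) : Prop := out = esAntisimetrica_alt matriz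
instance (matriz : List (List Int)) (out : Bool) : Decidable (Spec_esAntisimetrica matriz out) := by unfold Spec_esAntisimetrica; infer_instance

-- ===== CLAIM (what is proved, stated in full; the proofs are below) =====
def Claim_equal_esAntisimetrica : Prop := ∀ (matriz : List (List Int)), Dom_esAntisimetrica matriz → Spec_esAntisimetrica matriz (esAntisimetrica matriz)

-- ===== LEMMAS AND PROOFS =====

-- the hand-rolled early-return square check is the negation of B's `any`
theorem cuadradaLoop_eq_not_any (n : Nat) (m : List (List Int)) :
    esMatrizCuadradaLoop n m = !(m.any (fun fila => fila.length ≠ n)) := by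
  induction m with
  | nil => rfl
  | cons f rest ih => by_cases h : f.length = n <;> simp [esMatrizCuadradaLoop, h, ih]

theorem colLoop_eq_true_iff (m : List (List Int)) (fila c : Nat) :
    colLoop m fila c = true ↔
      ∀ j, c ≤ j → j < (m.getD fila []).length →
        (m.getD fila []).getD j 0 = - ((m.getD j []).getD fila 0) := by
  induction c using colLoop.induct m fila with
  | case3 c h =>
    rw [colLoop]
    simp only [dif_neg h]
    constructor
    · intro _ j hc hj; omega
    · intro _; trivial
  | case1 c h hne =>
    rw [colLoop]
    simp only [dif_pos h, if_pos hne]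
    constructor
    · intro hfalse; cases hfalse
    · intro hall; exact absurd (hall c le_rfl h) hne
  | case2 c h heq ih =>
    rw [colLoop]
    simp only [dif_pos h, if_neg heq]
    rw [ih]
    constructor
    · intro hall j hc hj
      rcases Nat.eq_or_lt_of_le hc with rfl | hlt
      · exact not_not.mp heq
      · exact hall j hlt hj
    · intro hall j hc hj; exact hall j (Nat.le_of_succ_le hc) hj

theorem filaLoop_eq_true_iff (m : List (List Int)) (f : Nat) :
    filaLoop m f = true ↔ ∀ i, f ≤ i → i < m.length → colLoop m i 0 = true := by
  induction f using filaLoop.induct m with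
  | case3 f h =>
    rw [filaLoop]
    simp only [dif_neg h]
    constructor
    · intro _ i hf hi; omega
    · intro _; trivial
  | case1 f h hfalse =>
    rw [filaLoop]
    simp only [dif_pos h, if_pos hfalse]
    constructor
    · intro hc; cases hc
    · intro hall; exact absurd (hall f le_rfl h) (by simp [hfalse])
  | case2 f h hcol ih =>
    rw [filaLoop]
    simp only [dif_pos h, if_neg hcol]
    rw [ih]
    constructor
    · intro hall i hf hi
      rcases Nat.eq_or_lt_of_le hf with rfl | hlt
      · exact Bool.of_not_eq_false hcol
      · exact hall i hlt hi
    · intro hall i hf hi; exact hall i (Nat.le_of_succ_le hf) hi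

-- B's matrix equality, on a square matrix, is exactly the elementwise property
theorem alt_eq_iff (m : List (List Int))
    (hsq : ∀ fila ∈ m, fila.length = m.length) :
    (m == (List.range m.length).map
        (fun i => (List.range m.length).map (fun j => - ((m.getD j []).getD i 0)))) = true ↔
      ∀ i, i < m.length → ∀ j, j < m.length →
        (m.getD i []).getD j 0 = - ((m.getD j []).getD i 0) := by
  rw [beq_iff_eq]
  constructor
  · intro heq i hi j hj
    have hrow : m.getD i [] = (List.range m.length).map (fun j => - ((m.getD j []).getD i 0)) := by
      conv_lhs => rw [heq]
      rw [List.getD_eq_getElem _ _ (by simpa using hi)]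
      simp
    rw [hrow]
    rw [List.getD_eq_getElem _ _ (by simpa using hj)]
    simp
  · intro hall
    apply List.ext_getElem
    · simp
    · intro i hi hi'
      have hlen : (m.getD i []).length = m.length := by
        rw [List.getD_eq_getElem _ _ hi]; exact hsq _ (List.getElem_mem hi)
      apply List.ext_getElem
      · simpa using (List.getD_eq_getElem m [] hi ▸ hlen)
      · intro j hj hj'
        have hjm : j < m.length := by simpa using hj'
        have h2 : m[i][j] = (m.getD i []).getD j 0 := by
          conv_rhs => rw [List.getD_eq_getElem m [] hi]
          exact (List.getD_eq_getElem _ _ hj).symm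
        rw [h2]
        simp only [List.getElem_map, List.getElem_range]
        exact hall i (by simpa using hi') j hjm

theorem esAntisimetrica_spec' (matriz : List (List Int)) :
    esAntisimetrica matriz = esAntisimetrica_alt matriz := by
  unfold esAntisimetrica esAntisimetrica_alt esMatrizCuadrada
  rw [cuadradaLoop_eq_not_any]
  cases hany : matriz.any (fun fila => fila.length ≠ matriz.length) with
  | true => simp only [hany, Bool.not_true, Bool.not_false, if_true]
  | false =>
    have hsq : ∀ fila ∈ matriz, fila.length = matriz.length := by
      intro fila hmem
      by_contra h
      have : matriz.any (fun fila => fila.length ≠ matriz.length) = true :=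
        List.any_eq_true.mpr ⟨fila, hmem, by simpa using h⟩
      rw [hany] at this; cases this
    simp only [hany, Bool.not_true, Bool.not_false, Bool.false_eq_true, if_false]
    rw [Bool.eq_iff_iff, filaLoop_eq_true_iff, alt_eq_iff matriz hsq]
    constructor
    · intro hall i hi j hj
      exact (colLoop_eq_true_iff matriz i 0).mp (hall i (Nat.zero_le i) hi) j (Nat.zero_le j)
        (by rw [List.getD_eq_getElem _ _ hi]; rw [hsq _ (List.getElem_mem hi)]; exact hj)
    · intro hall i _ hi
      rw [colLoop_eq_true_iff]
      intro j _ hj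
      have hjm : j < matriz.length := by
        have := hsq _ (List.getElem_mem hi)
        rwa [List.getD_eq_getElem _ _ hi, this] at hj
      exact hall i hi j hjm

-- ===== VERDICT (by name: the statement is the Claim_ definition above) =====
theorem esAntisimetrica_spec : Claim_equal_esAntisimetrica := by
  intro matriz _
  unfold Spec_esAntisimetrica
  exact esAntisimetrica_spec' matriz
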